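-- pv_equiv track=rewrite | github.com/grokpronoia/sonority_hierarchy | sonority_ranking.py | createWordDic
-- ===== SOURCE A (Python) =====
-- def createWordDic(rawPhones, rawWords, wordsData):
--     wordDict = {}
--     phones = capitalize(rawPhones)
--     words = capitalize(rawWords)
--     for phone in phones:
--         wordDict[phone] = []
--         for index, word in enumerate(words):
--             wordList = word.split(' ');
--             if phone in wordList:
--                 matchList = wordDict.get(phone)
--                 matchList.append(wordsData[index])
--     return wordDict
--
-- def capitalize(oldList):
--     newList = []
--     for element in oldList:
--         newList.append(element.upper())
--     return newList
-- ===== SOURCE B (Python) =====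
-- def createWordDic(rawPhones, rawWords, wordsData):
--     wordDict = {p.upper(): [] for p in rawPhones}
--     for index, word in enumerate(rawWords):
--         for tok in dict.fromkeys(word.upper().split(' ')):
--             if tok in wordDict:
--                 wordDict[tok].append(wordsData[index])
--     return wordDict
-- ===== Notes on version B (the rewrite author's own statement) =====
-- stated objective: faster
-- what changed: A rescans and resplits every word once per phone; B splits each word once and makes a single pass over the enumerated words, appending wordsData[index] to the pre-initialised list of each of the word's distinct tokens that is a phone key.
import Mathlib
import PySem

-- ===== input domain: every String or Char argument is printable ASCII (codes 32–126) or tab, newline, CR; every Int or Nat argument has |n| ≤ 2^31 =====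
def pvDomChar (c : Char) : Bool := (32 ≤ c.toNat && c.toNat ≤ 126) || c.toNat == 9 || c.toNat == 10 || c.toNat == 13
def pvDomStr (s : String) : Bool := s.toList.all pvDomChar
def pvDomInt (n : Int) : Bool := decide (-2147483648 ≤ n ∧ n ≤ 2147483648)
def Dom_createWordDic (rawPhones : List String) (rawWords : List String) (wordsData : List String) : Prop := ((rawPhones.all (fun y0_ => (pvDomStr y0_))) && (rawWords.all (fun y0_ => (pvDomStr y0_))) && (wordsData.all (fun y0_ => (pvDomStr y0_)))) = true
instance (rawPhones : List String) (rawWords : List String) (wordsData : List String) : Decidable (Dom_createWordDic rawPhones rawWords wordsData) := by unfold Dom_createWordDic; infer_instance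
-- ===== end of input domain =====

-- B replaces A's per-phone scan over all words by one pass over the enumerated words that appends
-- wordsData[index] to the (pre-initialised) lists of the word's distinct tokens; B raises exactly
-- where A does (a phone matching a word with index >= len(wordsData)) — those inputs are outside Pre_.
-- Dicts are returned as insertion-ordered association lists (.items), per the type convention.

-- s.split(' '): the separator is the nonempty literal " ", so Python never raises and split? is always some
def splitSp (s : String) : List String := (PySem.Str.split? s " ").getD []

-- ===== PORT A =====
-- helper 'capitalize' of A: loop appending element.upper()
def capitalizeA (oldList : List String) : List String :=
  oldList.foldl (fun newList element => newList ++ [PySem.Str.upper element]) []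

-- A's inner loop 'for index, word in enumerate(words): …' for one phone
def innerA (wordsData : List String) (words : List String) (phone : String)
    (wordDict : PySem.Dict String (List String)) : PySem.Dict String (List String) :=
  (PySem.List.enumerate words 0).foldl (fun wordDict iw =>
    let wordList := splitSp iw.2
    if wordList.contains phone then
      -- matchList = wordDict.get(phone); matchList.append(wordsData[index]) — in-place append;
      -- wordsData[index] in total form pyGetD: Pre_ guarantees the index is in range wherever Python does not raise
      wordDict.modify phone [] (fun matchList => matchList ++ [PySem.List.pyGetD wordsData iw.1 ""])
    else wordDict) wordDict

def createWordDic (rawPhones : List String) (rawWords : List String) (wordsData : List String) : List (String × List String) :=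
  let phones := capitalizeA rawPhones
  let words := capitalizeA rawWords
  (phones.foldl (fun wordDict phone =>
    innerA wordsData words phone (wordDict.insert phone [])) PySem.Dict.empty).items

-- ===== PORT B =====
-- B's inner loop: 'for tok in dict.fromkeys(word.upper().split(' ')): if tok in wordDict: wordDict[tok].append(wordsData[index])'
-- (wordsData[index] again in total pyGetD form: Pre_ guarantees in-range wherever B's Python does not raise)
def innerB (data : String) (toks : List String)
    (wordDict : PySem.Dict String (List String)) : PySem.Dict String (List String) :=
  toks.foldl (fun wordDict tok =>
    if wordDict.contains tok then wordDict.modify tok [] (fun l => l ++ [data]) else wordDict) wordDict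

def createWordDic_alt (rawPhones : List String) (rawWords : List String) (wordsData : List String) : List (String × List String) :=
  let d0 : PySem.Dict String (List String) :=
    rawPhones.foldl (fun d p => d.insert (PySem.Str.upper p) []) PySem.Dict.empty
  ((PySem.List.enumerate rawWords 0).foldl (fun d iw =>
    innerB (PySem.List.pyGetD wordsData iw.1 "") (PySem.List.dedup (splitSp (PySem.Str.upper iw.2))) d) d0).items

-- ===== PRECONDITION & SPEC =====
-- Pre_ is exactly the set of inputs on which A (and B) returns: both raise IndexError iff some word
-- at an index ≥ len(wordsData) contains one of the phones (wordsData[index] is evaluated only then).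
def Pre_createWordDic (rawPhones : List String) (rawWords : List String) (wordsData : List String) : Prop :=
  ∀ i ∈ List.range rawWords.length, wordsData.length ≤ i →
    ∀ p ∈ rawPhones,
      ((splitSp (PySem.Str.upper (rawWords.getD i ""))).contains (PySem.Str.upper p)) = false
instance (rawPhones : List String) (rawWords : List String) (wordsData : List String) : Decidable (Pre_createWordDic rawPhones rawWords wordsData) := by unfold Pre_createWordDic; infer_instance

def pvWitness_createWordDic : List String × List String × List String := (["a", "c"], ["a b", "c"], ["w1", "w2"])

def Spec_createWordDic (rawPhones : List String) (rawWords : List String) (wordsData : List String) (out : List (String × List String)) : Prop := out = createWordDic_alt rawPhones rawWords wordsData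
instance (rawPhones : List String) (rawWords : List String) (wordsData : List String) (out : List (String × List String)) : Decidable (Spec_createWordDic rawPhones rawWords wordsData out) := by unfold Spec_createWordDic; infer_instance

-- ===== CLAIM =====
def Claim_equal_createWordDic : Prop := ∀ (rawPhones : List String) (rawWords : List String) (wordsData : List String), Dom_createWordDic rawPhones rawWords wordsData → Pre_createWordDic rawPhones rawWords wordsData → Spec_createWordDic rawPhones rawWords wordsData (createWordDic rawPhones rawWords wordsData)

-- ===== LEMMAS AND PROOFS =====

-- A's value for phone p: data of the words (by enumerate index) whose token list contains p
def FA (wordsData words : List String) (p : String) : List String :=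
  ((PySem.List.enumerate words 0).filter (fun iw => (splitSp iw.2).contains p)).map
    (fun iw => PySem.List.pyGetD wordsData iw.1 "")

-- B's value for phone p: data (by enumerate index) of the words whose uppercased token list contains p
def FB (rawWords wordsData : List String) (p : String) : List String :=
  ((PySem.List.enumerate rawWords 0).filter (fun iw => (splitSp (PySem.Str.upper iw.2)).contains p)).map
    (fun iw => PySem.List.pyGetD wordsData iw.1 "")

theorem capitalizeA_aux (l : List String) (acc : List String) :
    l.foldl (fun newList element => newList ++ [PySem.Str.upper element]) acc
      = acc ++ l.map PySem.Str.upper := by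
  induction l generalizing acc with
  | nil => simp
  | cons x xs ih => simp [List.foldl, ih]

theorem capitalizeA_eq (l : List String) : capitalizeA l = l.map PySem.Str.upper := by
  rw [capitalizeA, capitalizeA_aux]; rfl

-- a fold that only ever modifies key p: its getD at p appends the filtered data, other keys untouched
theorem modifyLoop_getD {α : Type} (c : α → Bool) (g : α → String) (l : List α)
    (d : PySem.Dict String (List String)) (p q : String) :
    (l.foldl (fun d x => if c x then d.modify p [] (fun m => m ++ [g x]) else d) d).getD q []
      = if q = p then d.getD p [] ++ (l.filter c).map g else d.getD q [] := by
  induction l generalizing d with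
  | nil => by_cases hq : q = p <;> simp [hq]
  | cons x xs ih =>
    simp only [List.foldl, List.filter]
    by_cases hc : c x
    · simp only [hc, if_true]
      rw [ih]
      by_cases hq : q = p
      · subst hq
        simp [PySem.Dict.getD_modify_self]
      · simp [hq, PySem.Dict.getD_modify_of_ne d _ _ hq]
    · simp only [Bool.not_eq_true] at hc
      simp [hc, ih]

theorem modifyLoop_keys {α : Type} (c : α → Bool) (g : α → String) (l : List α)
    (d : PySem.Dict String (List String)) (p : String) (hp : d.contains p = true) :
    (l.foldl (fun d x => if c x then d.modify p [] (fun m => m ++ [g x]) else d) d).keys = d.keys := by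
  induction l generalizing d with
  | nil => rfl
  | cons x xs ih =>
    simp only [List.foldl]
    by_cases hc : c x
    · simp only [hc, if_true]
      rw [ih _ (by simp [PySem.Dict.contains_modify, hp]),
        PySem.Dict.keys_modify, PySem.Dict.keys_insert_of_contains d _ hp]
    · simp only [Bool.not_eq_true] at hc
      simp only [hc, Bool.false_eq_true, if_false]
      exact ih d hp

theorem innerA_getD (wordsData words : List String) (phone q : String)
    (d : PySem.Dict String (List String)) :
    (innerA wordsData words phone d).getD q []
      = if q = phone then d.getD phone [] ++ FA wordsData words phone else d.getD q [] := by
  simpa [innerA, FA] using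
    modifyLoop_getD (fun iw => (splitSp iw.2).contains phone)
      (fun iw => PySem.List.pyGetD wordsData iw.1 "") (PySem.List.enumerate words 0) d phone q

theorem innerA_keys (wordsData words : List String) (phone : String)
    (d : PySem.Dict String (List String)) (hp : d.contains phone = true) :
    (innerA wordsData words phone d).keys = d.keys := by
  simpa [innerA] using
    modifyLoop_keys (fun iw => (splitSp iw.2).contains phone)
      (fun iw => PySem.List.pyGetD wordsData iw.1 "") (PySem.List.enumerate words 0) d phone hp

theorem A_fold_getD (wordsData words : List String) (phones : List String)
    (d : PySem.Dict String (List String)) (q : String) :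
    (phones.foldl (fun wordDict phone => innerA wordsData words phone (wordDict.insert phone [])) d).getD q []
      = if q ∈ phones then FA wordsData words q else d.getD q [] := by
  induction phones generalizing d with
  | nil => simp
  | cons p ps ih =>
    simp only [List.foldl, ih]
    by_cases hq : q ∈ ps
    · simp [hq]
    · have hgd : (innerA wordsData words p (d.insert p [])).getD q []
          = if q = p then FA wordsData words p else d.getD q [] := by
        rw [innerA_getD]
        by_cases hqp : q = p
        · subst hqp; simp [PySem.Dict.getD_insert_self]
        · simp [hqp, PySem.Dict.getD_insert_of_ne d _ _ hqp]
      rw [if_neg hq, hgd]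
      by_cases hqp : q = p
      · subst hqp; simp
      · simp [hqp, hq]

theorem A_fold_keys (wordsData words : List String) (phones : List String)
    (d : PySem.Dict String (List String)) :
    (phones.foldl (fun wordDict phone => innerA wordsData words phone (wordDict.insert phone [])) d).keys
      = PySem.Set.update d.keys phones := by
  induction phones generalizing d with
  | nil => rfl
  | cons p ps ih =>
    rw [List.foldl, ih, innerA_keys _ _ _ _ (PySem.Dict.contains_insert_self _ _ _)]
    show PySem.Set.update (d.insert p []).keys ps = PySem.Set.update (PySem.Set.add d.keys p) ps
    congr 1
    by_cases hc : d.contains p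
    · rw [PySem.Dict.keys_insert_of_contains d _ hc]
      have hmem : p ∈ d.keys := (PySem.Dict.contains_iff_mem_keys d p).mp hc
      simp [PySem.Set.add, hmem]
    · rw [PySem.Dict.keys_insert_of_not_contains d _ (by simpa using hc)]
      have hmem : ¬ p ∈ d.keys := fun h => by
        rw [(PySem.Dict.contains_iff_mem_keys d p).mpr h] at hc; exact hc rfl
      simp [PySem.Set.add, hmem]

theorem innerB_getD (data : String) (toks : List String) (hnd : toks.Nodup)
    (d : PySem.Dict String (List String)) (q : String) :
    (innerB data toks d).getD q []
      = if q ∈ toks ∧ d.contains q = true then d.getD q [] ++ [data] else d.getD q [] := by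
  induction toks generalizing d with
  | nil => simp [innerB]
  | cons t ts ih =>
    have hnd' : ts.Nodup := hnd.of_cons
    have htn : t ∉ ts := (List.nodup_cons.mp hnd).1
    simp only [innerB, List.foldl] at *
    by_cases hc : d.contains t
    · simp only [hc, if_true]
      rw [ih hnd']
      by_cases hq : q = t
      · subst hq
        simp [htn, hc, PySem.Dict.getD_modify_self, PySem.Dict.contains_modify]
      · rw [PySem.Dict.getD_modify_of_ne d _ _ hq]
        simp [PySem.Dict.contains_modify, hq]
    · simp only [Bool.not_eq_true] at hc
      simp only [hc, Bool.false_eq_true, if_false]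
      rw [ih hnd']
      by_cases hq : q = t
      · subst hq; simp [hc, htn]
      · simp [hq]

theorem innerB_keys (data : String) (toks : List String)
    (d : PySem.Dict String (List String)) :
    (innerB data toks d).keys = d.keys := by
  induction toks generalizing d with
  | nil => rfl
  | cons t ts ih =>
    simp only [innerB, List.foldl] at *
    by_cases hc : d.contains t
    · simp only [hc, if_true]
      rw [ih, PySem.Dict.keys_modify, PySem.Dict.keys_insert_of_contains d _ hc]
    · simp only [Bool.not_eq_true] at hc
      simp only [hc, Bool.false_eq_true, if_false]
      exact ih d

theorem B_fold_getD (wordsData : List String) (zl : List (Int × String))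
    (d : PySem.Dict String (List String)) (q : String) :
    (zl.foldl (fun d iw =>
        innerB (PySem.List.pyGetD wordsData iw.1 "") (PySem.List.dedup (splitSp (PySem.Str.upper iw.2))) d) d).getD q []
      = d.getD q [] ++
          (if d.contains q then
            (zl.filter (fun iw => (splitSp (PySem.Str.upper iw.2)).contains q)).map
              (fun iw => PySem.List.pyGetD wordsData iw.1 "")
          else []) := by
  induction zl generalizing d with
  | nil => simp
  | cons iw zs ih =>
    simp only [List.foldl, List.filter]
    rw [ih]
    have hk := innerB_keys (PySem.List.pyGetD wordsData iw.1 "") (PySem.List.dedup (splitSp (PySem.Str.upper iw.2))) d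
    have hcont : ∀ r, (innerB (PySem.List.pyGetD wordsData iw.1 "") (PySem.List.dedup (splitSp (PySem.Str.upper iw.2))) d).contains r
        = d.contains r := by
      intro r
      rw [PySem.Dict.contains_eq_decide_mem_keys, PySem.Dict.contains_eq_decide_mem_keys, hk]
    rw [hcont, innerB_getD _ _ (PySem.List.nodup_dedup _) d q]
    by_cases hc : d.contains q
    · by_cases hqmem : q ∈ splitSp (PySem.Str.upper iw.2)
      · have hmem : q ∈ PySem.List.dedup (splitSp (PySem.Str.upper iw.2)) :=
          (PySem.List.mem_dedup _ _).mpr hqmem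
        simp [hc, hqmem]
      · have hmem : q ∉ PySem.List.dedup (splitSp (PySem.Str.upper iw.2)) :=
          fun h => hqmem ((PySem.List.mem_dedup _ _).mp h)
        simp [hc, hqmem]
    · simp only [Bool.not_eq_true] at hc
      simp [hc]

theorem B_fold_keys (wordsData : List String) (zl : List (Int × String))
    (d : PySem.Dict String (List String)) :
    (zl.foldl (fun d iw =>
        innerB (PySem.List.pyGetD wordsData iw.1 "") (PySem.List.dedup (splitSp (PySem.Str.upper iw.2))) d) d).keys
      = d.keys := by
  induction zl generalizing d with
  | nil => rfl
  | cons iw zs ih => simp only [List.foldl, ih, innerB_keys]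

theorem d0_getD (l : List String) (d : PySem.Dict String (List String))
    (h : ∀ r, d.getD r [] = []) (q : String) :
    (l.foldl (fun d p => d.insert (PySem.Str.upper p) []) d).getD q [] = [] := by
  induction l generalizing d with
  | nil => exact h q
  | cons p ps ih =>
    simp only [List.foldl]
    refine ih _ (fun r => ?_)
    by_cases hr : r = PySem.Str.upper p
    · subst hr; simp [PySem.Dict.getD_insert_self]
    · rw [PySem.Dict.getD_insert_of_ne d _ _ hr]; exact h r

theorem d0_keys (l : List String) :
    (l.foldl (fun d p => d.insert (PySem.Str.upper p) ([] : List String)) PySem.Dict.empty).keys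
      = PySem.List.dedup (l.map PySem.Str.upper) := by
  have := PySem.Dict.keys_foldl_insert_key (l := l) (key := PySem.Str.upper)
    (f := fun _ _ => ([] : List String)) (d := (PySem.Dict.empty : PySem.Dict String (List String)))
  simpa [PySem.Dict.keys_empty, PySem.Set.update, PySem.Set.ofList_eq_foldl] using this

-- enumerate commutes with map on the element: bridges A's enumerate over capitalized words to B's
-- enumerate over the raw words (the indices, hence the data lookups, are the same)
theorem enumerate_map (f : String → String) (ws : List String) (n : Int) :
    PySem.List.enumerate (ws.map f) n = (PySem.List.enumerate ws n).map (fun iw => (iw.1, f iw.2)) := by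
  induction ws generalizing n with
  | nil => simp [PySem.List.enumerate_nil]
  | cons w ws ih => simp [PySem.List.enumerate_cons, ih]

theorem FA_eq_FB (wordsData rawWords : List String) (p : String) :
    FA wordsData (rawWords.map PySem.Str.upper) p = FB rawWords wordsData p := by
  rw [FA, FB, enumerate_map, List.filter_map, List.map_map]
  rfl

-- keys of both final dicts coincide
theorem keysA_eq (rawPhones rawWords wordsData : List String) :
    ((capitalizeA rawPhones).foldl (fun wordDict phone =>
        innerA wordsData (capitalizeA rawWords) phone (wordDict.insert phone [])) PySem.Dict.empty).keys
      = PySem.List.dedup (rawPhones.map PySem.Str.upper) := by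
  rw [A_fold_keys, capitalizeA_eq]
  simp [PySem.Dict.keys_empty, PySem.Set.update, PySem.Set.ofList_eq_foldl]

theorem createWordDic_spec : Claim_equal_createWordDic := by
  intro rp rw wd _hdom _hpre
  unfold Spec_createWordDic createWordDic createWordDic_alt
  set dA := (capitalizeA rp).foldl (fun wordDict phone =>
      innerA wd (capitalizeA rw) phone (wordDict.insert phone [])) PySem.Dict.empty with hdA
  set dB := (PySem.List.enumerate rw 0).foldl (fun d iw =>
      innerB (PySem.List.pyGetD wd iw.1 "") (PySem.List.dedup (splitSp (PySem.Str.upper iw.2))) d)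
      (rp.foldl (fun d p => d.insert (PySem.Str.upper p) ([] : List String)) PySem.Dict.empty) with hdB
  have hkA : dA.keys = PySem.List.dedup (rp.map PySem.Str.upper) := keysA_eq rp rw wd
  have hkB : dB.keys = PySem.List.dedup (rp.map PySem.Str.upper) := by
    rw [hdB, B_fold_keys, d0_keys]
  have hndA : dA.keys.Nodup := by rw [hkA]; exact PySem.List.nodup_dedup _
  have hndB : dB.keys.Nodup := by rw [hkB]; exact PySem.List.nodup_dedup _
  rw [PySem.Dict.items_eq_map_keys dA hndA [], PySem.Dict.items_eq_map_keys dB hndB [],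
    hkA, hkB]
  apply List.map_congr_left
  intro q hq
  have hq' : q ∈ rp.map PySem.Str.upper := (PySem.List.mem_dedup _ _).mp hq
  obtain ⟨p, hp, rfl⟩ := List.mem_map.mp hq'
  congr 1
  -- A's value
  have hA : dA.getD (PySem.Str.upper p) [] = FA wd (capitalizeA rw) (PySem.Str.upper p) := by
    rw [hdA, A_fold_getD]
    rw [capitalizeA_eq rp]
    simp [List.mem_map.mpr ⟨p, hp, rfl⟩]
  -- B's value
  have hcB : (rp.foldl (fun d p => d.insert (PySem.Str.upper p) ([] : List String)) PySem.Dict.empty).contains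
      (PySem.Str.upper p) = true := by
    rw [PySem.Dict.contains_eq_decide_mem_keys, d0_keys]
    simp [List.mem_map.mpr ⟨p, hp, rfl⟩]
  have hB : dB.getD (PySem.Str.upper p) [] = FB rw wd (PySem.Str.upper p) := by
    rw [hdB, B_fold_getD, hcB, d0_getD rp PySem.Dict.empty (fun r => by simp)]
    simp [FB]
  rw [hA, hB, capitalizeA_eq rw, FA_eq_FB]
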